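-- pv_equiv track=rewrite | github.com/fosres/AppSec-Exercises | cyberscripts/auth_log/grader.py | get_category_breakdown
-- ===== SOURCE A (Python) =====
-- def get_category_breakdown(failures: list, total_per_cat: int = 15) -> dict:
-- 	"""Calculate pass/fail per category."""
-- 	categories = {
-- 		"1": ("Basic Parsing", 0),
-- 		"2": ("Edge Cases", 0),
-- 		"3": ("IP Handling", 0),
-- 		"4": ("Brute Force", 0),
-- 		"5": ("Timeline", 0),
-- 		"6": ("Top Offender", 0),
-- 		"7": ("Username Edge", 0),
-- 	}
--
-- 	# Count failures per category
-- 	failed_tests = set(f.split(":")[0] for f in failures)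
-- 	for test_name in failed_tests:
-- 		cat = test_name.split("_")[1]
-- 		if cat in categories:
-- 			name, fails = categories[cat]
-- 			categories[cat] = (name, fails + 1)
--
-- 	return categories
-- ===== SOURCE B (Python) =====
-- def get_category_breakdown(failures: list, total_per_cat: int = 15) -> dict:
--     """Calculate pass/fail per category."""
--     names = [("1", "Basic Parsing"), ("2", "Edge Cases"), ("3", "IP Handling"),
--              ("4", "Brute Force"), ("5", "Timeline"), ("6", "Top Offender"),
--              ("7", "Username Edge")]
--     # sort the failed categories, then measure run lengths of the sorted list
--     cats = sorted(t.split("_")[1] for t in set(f.split(":")[0] for f in failures))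
--     runs = {}
--     i = 0
--     n = len(cats)
--     while i < n:
--         j = i + 1
--         while j < n and cats[j] == cats[i]:
--             j += 1
--         runs[cats[i]] = j - i
--         i = j
--     return {k: (name, runs.get(k, 0)) for k, name in names}
-- ===== Notes on version B (the rewrite author's own statement) =====
-- stated objective: alternative
-- what changed: Instead of A's loop over the failure set mutating per-category counters in a dict, B sorts the failed categories and computes a run-length table of the sorted list with a two-pointer index scan, then assembles the fixed template against that table.
import Mathlib
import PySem

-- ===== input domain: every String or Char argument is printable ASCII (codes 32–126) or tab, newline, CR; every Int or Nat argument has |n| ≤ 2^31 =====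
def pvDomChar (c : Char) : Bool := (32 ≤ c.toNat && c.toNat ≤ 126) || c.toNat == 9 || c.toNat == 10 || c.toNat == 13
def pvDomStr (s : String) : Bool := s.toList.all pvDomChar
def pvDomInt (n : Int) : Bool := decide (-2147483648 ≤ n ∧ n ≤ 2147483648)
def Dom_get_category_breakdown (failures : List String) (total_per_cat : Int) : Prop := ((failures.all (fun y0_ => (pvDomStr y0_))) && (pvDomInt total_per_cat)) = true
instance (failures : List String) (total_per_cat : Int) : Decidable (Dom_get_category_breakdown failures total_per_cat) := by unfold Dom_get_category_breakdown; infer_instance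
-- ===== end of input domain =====

-- B replaces A's loop over the failure set that mutates per-category counters by
-- sort-then-run-length: sort the failed categories, measure run lengths with a
-- two-pointer index scan, and assemble the fixed template against that table
-- (objective: alternative).

-- f.split(":")[0] — split with nonempty sep is never empty, so index 0 never raises
def pvPrefixOf (f : String) : String :=
  PySem.List.pyGetD ((PySem.Str.split? f ":").getD []) 0 ""

-- test_name.split("_")[1] — raises IndexError when "_" does not occur; Pre_ excludes that,
-- so the total default "" (never a category key) is only taken outside Pre_
def pvCatOf (t : String) : String :=
  PySem.List.pyGetD ((PySem.Str.split? t "_").getD []) 1 ""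

-- ===== PORT A =====
-- Python iterates the set in hash order; the result is order-independent (the dict's keys are fixed
-- in advance and each step only adds 1 to one count), so the foldl over Set.ofList is exact.
def get_category_breakdown (failures : List String) (total_per_cat : Int) : List (String × String × Int) :=
  let categories : PySem.Dict String (String × Int) := PySem.Dict.mk
    [("1", ("Basic Parsing", 0)), ("2", ("Edge Cases", 0)), ("3", ("IP Handling", 0)),
     ("4", ("Brute Force", 0)), ("5", ("Timeline", 0)), ("6", ("Top Offender", 0)),
     ("7", ("Username Edge", 0))]
  let failed_tests : PySem.Set String := PySem.Set.ofList (failures.map pvPrefixOf)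
  let final := failed_tests.foldl (fun cats test_name =>
    let cat := pvCatOf test_name
    if cats.contains cat then
      match cats.get? cat with
      | some (name, fails) => cats.insert cat (name, fails + 1)
      | none => cats
    else cats) categories
  final.items

-- ===== PORT B =====
def pvTemplate : List (String × String) :=
  [("1", "Basic Parsing"), ("2", "Edge Cases"), ("3", "IP Handling"),
   ("4", "Brute Force"), ("5", "Timeline"), ("6", "Top Offender"),
   ("7", "Username Edge")]

-- the inner 'while j < n and cats[j] == cats[i]' loop of Source B; indices are guarded
-- by 'j < n' before any access, so Python's cats[j] is getD with an unused default;
-- the fuel argument is only a structural totality guard (cats.length is always enough)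
def pvInner (cats : List String) (c : String) : Nat → Nat → Nat
  | j, fuel + 1 =>
    if j < cats.length ∧ cats.getD j "" = c then pvInner cats c (j + 1) fuel else j
  | j, 0 => j

-- the outer while loop of Source B, building the run-length table 'runs' (fuel as above)
def pvOuter (cats : List String) : Nat → PySem.Dict String Int → Nat → PySem.Dict String Int
  | i, runs, fuel + 1 =>
    if i < cats.length then
      pvOuter cats (pvInner cats (cats.getD i "") (i + 1) cats.length)
        (runs.insert (cats.getD i "")
          ((pvInner cats (cats.getD i "") (i + 1) cats.length : Int) - (i : Int))) fuel
    else runs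
  | _, runs, 0 => runs

def get_category_breakdown_alt (failures : List String) (total_per_cat : Int) : List (String × String × Int) :=
  let cats : List String :=
    PySem.List.sorted ((PySem.Set.ofList (failures.map pvPrefixOf)).map pvCatOf) (fun x => x) false
  let runs := pvOuter cats 0 (PySem.Dict.mk []) cats.length
  pvTemplate.map (fun p => (p.1, p.2, runs.getD p.1 0))

-- ===== PRECONDITION & SPEC =====
-- Pre_ excludes exactly the inputs where some failure's test name (before ":") has no "_",
-- on which the Python (A and B alike) raises IndexError at split("_")[1].
def Pre_get_category_breakdown (failures : List String) (total_per_cat : Int) : Prop :=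
  ∀ f ∈ failures, PySem.Str.isIn "_" (pvPrefixOf f) = true

instance (failures : List String) (total_per_cat : Int) : Decidable (Pre_get_category_breakdown failures total_per_cat) := by unfold Pre_get_category_breakdown; infer_instance

def pvWitness_get_category_breakdown : List String × Int := (["t_1"], 15)

def Spec_get_category_breakdown (failures : List String) (total_per_cat : Int) (out : List (String × String × Int)) : Prop := out = get_category_breakdown_alt failures total_per_cat
instance (failures : List String) (total_per_cat : Int) (out : List (String × String × Int)) : Decidable (Spec_get_category_breakdown failures total_per_cat out) := by unfold Spec_get_category_breakdown; infer_instance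

-- ===== CLAIM (what is proved, stated in full; the proofs are below) =====
def Claim_equal_get_category_breakdown : Prop := ∀ (failures : List String) (total_per_cat : Int), Dom_get_category_breakdown failures total_per_cat → Pre_get_category_breakdown failures total_per_cat → Spec_get_category_breakdown failures total_per_cat (get_category_breakdown failures total_per_cat)

-- ===== LEMMAS AND PROOFS =====

-- the loop body of port A, abstracted
def pvStep (d : PySem.Dict String (String × Int)) (t : String) : PySem.Dict String (String × Int) :=
  if d.contains (pvCatOf t) then
    match d.get? (pvCatOf t) with
    | some (name, fails) => d.insert (pvCatOf t) (name, fails + 1)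
    | none => d
  else d

theorem pvStep_get? (d : PySem.Dict String (String × Int)) (t k : String) :
    (pvStep d t).get? k =
      (d.get? k).map (fun p => (p.1, p.2 + if pvCatOf t = k then 1 else 0)) := by
  unfold pvStep
  by_cases hk : pvCatOf t = k
  · subst hk
    rw [PySem.Dict.contains_eq_isSome_get?]
    cases h : d.get? (pvCatOf t) with
    | none => simp [h]
    | some p =>
      cases p with
      | mk name fails => simp [PySem.Dict.get?_insert_self]
  · rw [PySem.Dict.contains_eq_isSome_get?]
    cases h : d.get? (pvCatOf t) with
    | none =>
      simp [hk]
    | some p =>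
      cases p with
      | mk name fails =>
        have hne : k ≠ pvCatOf t := fun hh => hk hh.symm
        simp only [Option.isSome_some, if_true]
        rw [PySem.Dict.get?_insert_of_ne d _ hne]
        simp only [hk, if_false]
        cases d.get? k <;> simp

theorem pvFoldl_get? (ts : List String) (d : PySem.Dict String (String × Int)) (k : String) :
    (ts.foldl pvStep d).get? k =
      (d.get? k).map (fun p => (p.1, p.2 + ((ts.map pvCatOf).count k : Int))) := by
  induction ts generalizing d with
  | nil => cases h : d.get? k <;> simp [h]
  | cons t ts ih =>
    simp only [List.foldl_cons, ih, pvStep_get?]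
    cases d.get? k with
    | none => simp
    | some p =>
      simp [List.count_cons]
      by_cases h : pvCatOf t = k <;> simp [h] <;> ring

theorem pvStep_keys (d : PySem.Dict String (String × Int)) (t : String) :
    (pvStep d t).keys = d.keys := by
  unfold pvStep
  by_cases hc : d.contains (pvCatOf t)
  · cases h : d.get? (pvCatOf t) with
    | none => simp [hc]
    | some p =>
      cases p with
      | mk name fails => simp [hc, PySem.Dict.keys_insert_of_contains d _ hc]
  · simp [hc]

theorem pvFoldl_keys (ts : List String) (d : PySem.Dict String (String × Int)) :
    (ts.foldl pvStep d).keys = d.keys := by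
  induction ts generalizing d with
  | nil => rfl
  | cons t ts ih => simp only [List.foldl_cons, ih, pvStep_keys]

-- pvInner is i + the length of the leading run of c in the suffix
theorem pvInner_eq (cats : List String) (c : String) (j fuel : Nat)
    (hj : j ≤ cats.length) (hfuel : cats.length ≤ j + fuel) :
    pvInner cats c j fuel = j + ((cats.drop j).takeWhile (fun x => x == c)).length := by
  induction fuel generalizing j with
  | zero =>
    have hje : j = cats.length := by omega
    have : cats.drop j = [] := List.drop_eq_nil_of_le (by omega)
    simp [pvInner, this]
  | succ fuel ih =>
    by_cases h : j < cats.length ∧ cats.getD j "" = c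
    · obtain ⟨hlt, heq⟩ := h
      have hd : cats.drop j = cats[j] :: cats.drop (j + 1) := List.drop_eq_getElem_cons hlt
      have hg : cats.getD j "" = cats[j] := by
        simp [List.getD_eq_getElem?_getD, List.getElem?_eq_getElem hlt]
      rw [pvInner, if_pos ⟨hlt, heq⟩, ih (j + 1) (by omega) (by omega), hd]
      rw [hg] at heq
      simp [heq]
      omega
    · rw [pvInner, if_neg h]
      rcases Nat.lt_or_ge j cats.length with hlt | hge
      · have hd : cats.drop j = cats[j] :: cats.drop (j + 1) := List.drop_eq_getElem_cons hlt
        have hg : cats.getD j "" = cats[j] := by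
          simp [List.getD_eq_getElem?_getD, List.getElem?_eq_getElem hlt]
        have hne : ¬ cats[j] = c := by
          intro hc; exact h ⟨hlt, by rw [hg, hc]⟩
        rw [hd]
        simp [hne]
      · have : cats.drop j = [] := List.drop_eq_nil_of_le hge
        simp [this]

-- main invariant of the outer loop on a sorted suffix
theorem pvOuter_getD (cats : List String) (k : String) :
    ∀ (fuel : Nat) (i : Nat) (runs : PySem.Dict String Int), i ≤ cats.length →
      cats.length ≤ i + fuel → (cats.drop i).Pairwise (· ≤ ·) →
      (pvOuter cats i runs fuel).getD k 0 =
        if k ∈ cats.drop i then ((cats.drop i).count k : Int) else runs.getD k 0 := by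
  intro fuel
  induction fuel with
  | zero =>
    intro i runs hi hfuel _hs
    have hd : cats.drop i = [] := List.drop_eq_nil_of_le (by omega)
    simp [pvOuter, hd]
  | succ fuel ih =>
    intro i runs hi hfuel hs
    by_cases h : i < cats.length
    · rw [pvOuter, if_pos h]
      set c := cats.getD i "" with hcdef
      set j := pvInner cats c (i + 1) cats.length with hjdef
      have hd : cats.drop i = cats[i] :: cats.drop (i + 1) := List.drop_eq_getElem_cons h
      have hg : c = cats[i] := by
        rw [hcdef]
        simp [List.getD_eq_getElem?_getD, List.getElem?_eq_getElem h]
      have hj : j = (i + 1) + ((cats.drop (i + 1)).takeWhile (fun x => x == c)).length := by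
        rw [hjdef]
        exact pvInner_eq cats c (i + 1) cats.length (by omega) (by omega)
      -- split drop (i+1) into the run of c and the rest
      set tw := (cats.drop (i + 1)).takeWhile (fun x => x == c) with htw
      set dw := (cats.drop (i + 1)).dropWhile (fun x => x == c) with hdw
      have hsplit : cats.drop (i + 1) = tw ++ dw := (List.takeWhile_append_dropWhile).symm
      have htwc : ∀ x ∈ tw, x = c := by
        intro x hx
        have := List.mem_takeWhile_imp hx
        simpa using this
      have hdj : cats.drop j = dw := by
        have : cats.drop j = (cats.drop (i + 1)).drop tw.length := by
          rw [List.drop_drop, hj]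
        rw [this, hsplit, List.drop_left]
      -- sortedness of the suffixes
      have hs1 : (cats.drop (i + 1)).Pairwise (· ≤ ·) := by
        rw [hd] at hs; exact hs.of_cons
      have hsj : (cats.drop j).Pairwise (· ≤ ·) := by
        rw [hdj]
        exact hs1.sublist (hsplit ▸ List.sublist_append_right tw dw)
      -- c does not occur in dw
      have hcnot : c ∉ dw := by
        intro hc
        cases hdwc : dw with
        | nil => simp [hdwc] at hc
        | cons d dws =>
          have hdne : ¬ (d == c) = true := by
            have := List.head?_dropWhile_not (fun x => x == c) (cats.drop (i + 1))
            rw [← hdw, hdwc] at this; simpa using this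
          have hle : ∀ y ∈ dws, d ≤ y := by
            have := hsj
            rw [hdj, hdwc] at this
            exact fun y hy => (List.pairwise_cons.mp this).1 y hy
          have hcd : c ≤ d := by
            have hdm : d ∈ cats.drop (i + 1) := by
              rw [hsplit, hdwc]; exact List.mem_append_right _ List.mem_cons_self
            rw [hd] at hs
            rw [hg]
            exact (List.pairwise_cons.mp hs).1 d hdm
          rw [hdwc] at hc
          rcases List.mem_cons.mp hc with hc | hc
          · exact hdne (by simp [hc])
          · have := hle c hc
            have hne : d ≠ c := fun hcc => hdne (by simp [hcc])
            exact hne (le_antisymm this hcd)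
      have hjle : j ≤ cats.length := by
        have h1 : tw.length ≤ (cats.drop (i + 1)).length := by
          have := congrArg List.length hsplit
          simp only [List.length_append] at this
          omega
        have h2 : (cats.drop (i + 1)).length = cats.length - (i + 1) := by simp
        omega
      rw [ih j _ hjle (by omega) hsj]
      by_cases hk : k ∈ cats.drop j
      · -- k in the remainder: counts over drop i and drop j agree (k ≠ c, run only holds c)
        have hkc : k ≠ c := fun hkc => hcnot (hkc ▸ hdj ▸ hk)
        have hmem : k ∈ cats.drop i := by
          rw [hd, hsplit]
          exact List.mem_cons.mpr (Or.inr (List.mem_append_right _ (hdj ▸ hk)))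
        rw [if_pos hk, if_pos hmem]
        have hcnt : (cats.drop i).count k = (cats.drop j).count k := by
          rw [hd, hsplit, hdj, List.count_cons, List.count_append]
          have h1 : tw.count k = 0 := by
            rw [List.count_eq_zero]
            intro hkt; exact hkc (htwc k hkt)
          have h2 : ¬ (cats[i] == k) = true := by
            simp only [beq_iff_eq]
            intro hck; exact hkc (by rw [← hck, hg])
          simp [h1, h2]
        rw [hcnt]
      · rw [if_neg hk]
        by_cases hkc : k = c
        · -- k = c: the inserted run length j - i is exactly the count of c
          have hmem : k ∈ cats.drop i := by
            rw [hd, hkc, hg]; exact List.mem_cons_self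
          rw [if_pos hmem]
          have hget : (runs.insert c ((j : Int) - (i : Int))).getD k 0 = (j : Int) - (i : Int) := by
            rw [hkc, PySem.Dict.getD_eq_get?_getD, PySem.Dict.get?_insert_self]; rfl
          rw [hget]
          have hcnt : (cats.drop i).count k = 1 + tw.length := by
            rw [hd, hsplit, List.count_cons, List.count_append]
            have h1 : tw.count k = tw.length := by
              rw [List.count_eq_length]
              intro x hx; exact hkc.trans (htwc x hx).symm
            have h2 : (cats[i] == k) = true := by simp [← hg, hkc]
            have h3 : dw.count k = 0 := by
              rw [List.count_eq_zero, hkc]; exact hcnot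
            simp [h1, h2, h3]
            omega
          rw [hcnt, hj]
          push_cast
          ring
        · have hmem : k ∉ cats.drop i := by
            rw [hd, hsplit]
            intro hm
            rcases List.mem_cons.mp hm with hm | hm
            · exact hkc (by rw [hm, ← hg])
            · rcases List.mem_append.mp hm with hm | hm
              · exact hkc (htwc k hm)
              · exact hk (hdj ▸ hm)
          rw [if_neg hmem, PySem.Dict.getD_eq_get?_getD,
              PySem.Dict.get?_insert_of_ne _ _ hkc, ← PySem.Dict.getD_eq_get?_getD]
    · rw [pvOuter, if_neg h]
      have hd : cats.drop i = [] := List.drop_eq_nil_of_le (by omega)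
      simp [hd]

theorem pvRuns_getD (l : List String) (k : String) :
    (pvOuter (PySem.List.sorted l (fun x => x) false) 0 (PySem.Dict.mk [])
        (PySem.List.sorted l (fun x => x) false).length).getD k 0
      = (l.count k : Int) := by
  set cs := PySem.List.sorted l (fun x => x) false with hcs
  have hp : cs.Pairwise (· ≤ ·) := by
    simpa using PySem.List.sorted_pairwise l (fun x => x)
  have hperm : cs.Perm l := PySem.List.sorted_perm l (fun x => x) false
  have := pvOuter_getD cs k cs.length 0 (PySem.Dict.mk []) (by omega) (by omega)
    (by simpa using hp)
  simp only [List.drop_zero] at this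
  rw [this]
  by_cases hk : k ∈ cs
  · rw [if_pos hk, hperm.count_eq]
  · rw [if_neg hk]
    have : l.count k = 0 := by
      rw [List.count_eq_zero]
      exact fun hm => hk (hperm.mem_iff.mpr hm)
    simp [this, PySem.Dict.getD_eq_get?_getD]
    rfl

-- ===== VERDICT (by name: the statement is the Claim_ definition above) =====

theorem get_category_breakdown_spec : Claim_equal_get_category_breakdown := by
  intro failures total_per_cat _hDom _hPre
  unfold Spec_get_category_breakdown get_category_breakdown get_category_breakdown_alt
  simp only
  set ts : List String := PySem.Set.ofList (failures.map pvPrefixOf) with hts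
  set D0 : PySem.Dict String (String × Int) := PySem.Dict.mk
    [("1", ("Basic Parsing", 0)), ("2", ("Edge Cases", 0)), ("3", ("IP Handling", 0)),
     ("4", ("Brute Force", 0)), ("5", ("Timeline", 0)), ("6", ("Top Offender", 0)),
     ("7", ("Username Edge", 0))] with hD0
  have hfold : (ts.foldl (fun cats test_name =>
      let cat := pvCatOf test_name
      if cats.contains cat then
        match cats.get? cat with
        | some (name, fails) => cats.insert cat (name, fails + 1)
        | none => cats
      else cats) D0) = ts.foldl pvStep D0 := rfl
  rw [hfold]
  have hkeys : (ts.foldl pvStep D0).keys = D0.keys := pvFoldl_keys ts D0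
  have hnd : (ts.foldl pvStep D0).keys.Nodup := by rw [hkeys]; decide
  rw [PySem.Dict.items_eq_map_keys _ hnd ("", 0), hkeys]
  have hget : ∀ k : String, (ts.foldl pvStep D0).getD k ("", 0) =
      (((D0.get? k).map (fun p => (p.1, p.2 + ((ts.map pvCatOf).count k : Int)))).getD ("", 0)) := by
    intro k
    rw [PySem.Dict.getD_eq_get?_getD, pvFoldl_get?]
  show D0.keys.map (fun k => (k, (ts.foldl pvStep D0).getD k ("", 0))) = _
  simp only [hget]
  unfold pvTemplate
  have hk7 : D0.keys = ["1", "2", "3", "4", "5", "6", "7"] := by decide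
  rw [hk7]
  simp only [List.map_cons, List.map_nil, hD0, PySem.Dict.get?_mk_cons]
  simp only [pvRuns_getD]
  simp
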